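-- pv_equiv track=rewrite | github.com/JeremiahSchroeder/Advent-of-Code-2022 | Day15/Day15.py | findBeaconFreeRanges
-- ===== SOURCE A (Python) =====
-- def findBeaconFreeRanges(sensorCoordinates,beaconCoordinates,distances,row):
--
--     numSensors = len(sensorCoordinates)
--     overlappedFreeRanges = []
--
--     for i in range(0,numSensors):
--         sensorCoordinate = sensorCoordinates[i]
--         distance = distances[i]
--
--         if abs(row-sensorCoordinate[1])<=distance:
--
--             numFreeInRow = 2*(distance-abs(row-sensorCoordinate[1]))+1
--
--             startX = sensorCoordinate[0]-(numFreeInRow-1)//2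
--             endX = sensorCoordinate[0]+(numFreeInRow-1)//2
--
--             overlappedFreeRanges.append([startX,endX])
--
--     overlappedFreeRanges.sort()
--
--     freeRanges = []
--
--     for overlappedRange in overlappedFreeRanges:
--         if len(freeRanges) == 0:
--             freeRanges.append(overlappedRange)
--         else:
--             if overlappedRange[0] <= freeRanges[-1][1] and overlappedRange[1] > freeRanges[-1][1]:
--                 freeRanges[-1] = [freeRanges[-1][0], overlappedRange[1]]
--             elif overlappedRange[0] > freeRanges[-1][1]:
--                 freeRanges.append(overlappedRange)
--
--     numFree = 0
--     for freeRange in freeRanges: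
--         numFree += freeRange[1]-freeRange[0]+1
--     for beaconCoordinate in beaconCoordinates:
--         if beaconCoordinate[1] == row:
--             for freeRange in freeRanges:
--                 if beaconCoordinate[0] >= freeRange[0] and beaconCoordinate[0] <= freeRange[1]:
--                     numFree -= 1
--
--                     break
--
--     return numFree
-- ===== SOURCE B (Python) =====
-- def findBeaconFreeRanges(sensorCoordinates, beaconCoordinates, distances, row):
--     # collect the covered interval of each sensor that reaches the row
--     intervals = []
--     for i in range(len(sensorCoordinates)):
--         sx, sy = sensorCoordinates[i]
--         r = distances[i] - abs(row - sy)
--         if r >= 0: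
--             intervals.append((sx - r, sx + r))
--     # single sweep over the sorted intervals: keep only (total, rightmost end seen)
--     total = 0
--     curEnd = None
--     for s, e in sorted(intervals):
--         lo = s if curEnd is None else max(s, curEnd + 1)
--         if lo <= e:
--             total += e - lo + 1
--         if curEnd is None or e > curEnd:
--             curEnd = e
--     # one subtraction per beacon occurrence lying in the covered union
--     for bx, by in beaconCoordinates:
--         if by == row and any(s <= bx <= e for s, e in intervals):
--             total -= 1
--     return total
-- ===== Notes on version B (the rewrite author's own statement) =====
-- stated objective: simpler
-- what changed: B never materialises A's sorted-and-merged interval list: a single sweep over the sorted intervals keeps only (total, rightmost end) scalars, and beacons are tested against the raw unmerged intervals instead of the merged list.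
import Mathlib
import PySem

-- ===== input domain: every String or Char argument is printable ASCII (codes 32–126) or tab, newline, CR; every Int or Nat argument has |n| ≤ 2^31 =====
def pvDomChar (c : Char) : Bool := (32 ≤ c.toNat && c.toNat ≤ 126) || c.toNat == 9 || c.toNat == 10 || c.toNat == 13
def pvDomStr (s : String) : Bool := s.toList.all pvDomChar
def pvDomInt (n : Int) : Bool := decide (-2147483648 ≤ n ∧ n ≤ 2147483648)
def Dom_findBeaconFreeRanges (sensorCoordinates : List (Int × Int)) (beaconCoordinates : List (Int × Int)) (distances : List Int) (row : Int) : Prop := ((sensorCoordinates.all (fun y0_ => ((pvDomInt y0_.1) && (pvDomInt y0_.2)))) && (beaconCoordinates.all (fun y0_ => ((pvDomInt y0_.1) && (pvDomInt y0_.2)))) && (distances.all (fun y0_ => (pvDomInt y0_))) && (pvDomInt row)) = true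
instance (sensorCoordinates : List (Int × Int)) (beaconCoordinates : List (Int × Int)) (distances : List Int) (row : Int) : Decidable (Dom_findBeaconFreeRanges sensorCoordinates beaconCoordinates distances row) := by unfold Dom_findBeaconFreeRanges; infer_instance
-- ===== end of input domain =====

-- B replaces A's build-merged-interval-list-then-sum pass by a single sweep keeping only (total, rightmost end),
-- and tests beacons against the raw (unmerged) intervals; objective: simpler (no merged list is materialised).

-- ===== PORT A =====
-- the first loop: collect [startX, endX] for each sensor reaching the row
def pvBuildA (sensorCoordinates : List (Int × Int)) (distances : List Int) (row : Int) : List (Int × Int) :=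
  (PySem.List.pyRange 0 (sensorCoordinates.length : Int) 1).foldl (fun acc i =>
    let sensorCoordinate := PySem.List.pyGetD sensorCoordinates i (0, 0)
    let distance := PySem.List.pyGetD distances i 0
    if |row - sensorCoordinate.2| ≤ distance then
      let numFreeInRow := 2 * (distance - |row - sensorCoordinate.2|) + 1
      acc ++ [(sensorCoordinate.1 - PySem.Int.floordiv (numFreeInRow - 1) 2,
               sensorCoordinate.1 + PySem.Int.floordiv (numFreeInRow - 1) 2)]
    else acc) []

-- body of A's second loop (freeRanges[-1] read / replaced via getLast? / dropLast)
def pvMergeStep (freeRanges : List (Int × Int)) (ov : Int × Int) : List (Int × Int) :=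
  match freeRanges.getLast? with
  | none => [ov]
  | some last =>
      if ov.1 ≤ last.2 ∧ ov.2 > last.2 then freeRanges.dropLast ++ [(last.1, ov.2)]
      else if ov.1 > last.2 then freeRanges ++ [ov]
      else freeRanges

def findBeaconFreeRanges (sensorCoordinates : List (Int × Int)) (beaconCoordinates : List (Int × Int)) (distances : List Int) (row : Int) : Int :=
  let overlappedFreeRanges := pvBuildA sensorCoordinates distances row
  -- .sort() on 2-element lists is lexicographic
  let sortedRanges := PySem.List.sorted2 overlappedFreeRanges Prod.fst Prod.snd
  let freeRanges := sortedRanges.foldl pvMergeStep []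
  let numFree := freeRanges.foldl (fun n fr => n + (fr.2 - fr.1 + 1)) 0
  -- the inner loop subtracts 1 and breaks at the first covering range: subtract 1 iff some range covers
  beaconCoordinates.foldl (fun n b =>
    if b.2 = row ∧ freeRanges.any (fun fr => decide (fr.1 ≤ b.1 ∧ b.1 ≤ fr.2)) then n - 1 else n) numFree

-- ===== PORT B =====
def pvBuildB (sensorCoordinates : List (Int × Int)) (distances : List Int) (row : Int) : List (Int × Int) :=
  (PySem.List.pyRange 0 (sensorCoordinates.length : Int) 1).foldl (fun acc i =>
    let s := PySem.List.pyGetD sensorCoordinates i (0, 0)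
    let r := PySem.List.pyGetD distances i 0 - |row - s.2|
    if 0 ≤ r then acc ++ [(s.1 - r, s.1 + r)] else acc) []

-- body of B's sweep: state = (total, curEnd); curEnd = none before the first interval;
-- lo = p.1 when curEnd is none, else max p.1 (curEnd+1)
def pvSweepStep (st : Int × Option Int) (p : Int × Int) : Int × Option Int :=
  match st.2 with
  | none => (if p.1 ≤ p.2 then st.1 + (p.2 - p.1 + 1) else st.1, some p.2)
  | some c =>
      (if max p.1 (c + 1) ≤ p.2 then st.1 + (p.2 - max p.1 (c + 1) + 1) else st.1,
       some (if c < p.2 then p.2 else c))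

def findBeaconFreeRanges_alt (sensorCoordinates : List (Int × Int)) (beaconCoordinates : List (Int × Int)) (distances : List Int) (row : Int) : Int :=
  let intervals := pvBuildB sensorCoordinates distances row
  let st := (PySem.List.sorted2 intervals Prod.fst Prod.snd).foldl pvSweepStep (0, none)
  beaconCoordinates.foldl (fun n b =>
    if b.2 = row ∧ intervals.any (fun q => decide (q.1 ≤ b.1 ∧ b.1 ≤ q.2)) then n - 1 else n) st.1

-- ===== PRECONDITION & SPEC =====
-- Pre_ excludes only the inputs where A raises IndexError: distances shorter than sensorCoordinates
-- (distances[i] is read for every sensor index i).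
def Pre_findBeaconFreeRanges (sensorCoordinates : List (Int × Int)) (beaconCoordinates : List (Int × Int)) (distances : List Int) (row : Int) : Prop := sensorCoordinates.length ≤ distances.length
instance (sensorCoordinates : List (Int × Int)) (beaconCoordinates : List (Int × Int)) (distances : List Int) (row : Int) : Decidable (Pre_findBeaconFreeRanges sensorCoordinates beaconCoordinates distances row) := by unfold Pre_findBeaconFreeRanges; infer_instance
def pvWitness_findBeaconFreeRanges : (List (Int × Int)) × (List (Int × Int)) × List Int × Int := ([(0, 0), (5, 1)], [(2, 0)], [2, 1], 0)

def Spec_findBeaconFreeRanges (sensorCoordinates : List (Int × Int)) (beaconCoordinates : List (Int × Int)) (distances : List Int) (row : Int) (out : Int) : Prop := out = findBeaconFreeRanges_alt sensorCoordinates beaconCoordinates distances row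
instance (sensorCoordinates : List (Int × Int)) (beaconCoordinates : List (Int × Int)) (distances : List Int) (row : Int) (out : Int) : Decidable (Spec_findBeaconFreeRanges sensorCoordinates beaconCoordinates distances row out) := by unfold Spec_findBeaconFreeRanges; infer_instance

-- ===== CLAIM (what is proved, stated in full; the proofs are below) =====
def Claim_equal_findBeaconFreeRanges : Prop := ∀ (sensorCoordinates : List (Int × Int)) (beaconCoordinates : List (Int × Int)) (distances : List Int) (row : Int), Dom_findBeaconFreeRanges sensorCoordinates beaconCoordinates distances row → Pre_findBeaconFreeRanges sensorCoordinates beaconCoordinates distances row → Spec_findBeaconFreeRanges sensorCoordinates beaconCoordinates distances row (findBeaconFreeRanges sensorCoordinates beaconCoordinates distances row)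

-- ===== LEMMAS AND PROOFS =====

-- the two building loops produce the same interval list
lemma pvBuild_eq (sc : List (Int × Int)) (ds : List Int) (row : Int) :
    pvBuildA sc ds row = pvBuildB sc ds row := by
  unfold pvBuildA pvBuildB
  refine PySem.List.foldl_congr_mem _ _ _ _ ?_
  intro acc i _
  simp only
  set d := PySem.List.pyGetD ds i 0 with hd
  set s := PySem.List.pyGetD sc i (0, 0) with hs
  have hfd : PySem.Int.floordiv (2 * (d - |row - s.2|) + 1 - 1) 2 = d - |row - s.2| := by
    have h1 : (2 * (d - |row - s.2|) + 1 - 1 : Int) = 2 * (d - |row - s.2|) := by ring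
    rw [h1, PySem.Int.floordiv_eq_ediv_of_pos (by norm_num : (0:Int) < 2)]
    omega
  by_cases h : |row - s.2| ≤ d
  · rw [if_pos h, if_pos (by omega : (0:Int) ≤ d - |row - s.2|), hfd]
  · rw [if_neg h, if_neg (by omega : ¬ (0:Int) ≤ d - |row - s.2|)]

-- every interval B collects is nonempty (lo ≤ hi)
lemma pvBuildB_lohi (sc : List (Int × Int)) (ds : List Int) (row : Int) :
    ∀ p ∈ pvBuildB sc ds row, p.1 ≤ p.2 := by
  unfold pvBuildB
  rw [PySem.List.foldl_append_ite
      (p := fun i => (0:Int) ≤ PySem.List.pyGetD ds i 0 - |row - (PySem.List.pyGetD sc i (0, 0)).2|)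
      (f := fun i => ((PySem.List.pyGetD sc i (0, 0)).1 - (PySem.List.pyGetD ds i 0 - |row - (PySem.List.pyGetD sc i (0, 0)).2|),
                      (PySem.List.pyGetD sc i (0, 0)).1 + (PySem.List.pyGetD ds i 0 - |row - (PySem.List.pyGetD sc i (0, 0)).2|)))]
  intro p hp
  simp only [List.nil_append, List.mem_map, List.mem_filter, decide_eq_true_eq] at hp
  obtain ⟨i, ⟨_, hi⟩, rfl⟩ := hp
  simp only
  omega

-- sum of lengths of a range list (A's third loop)
def pvSumLen (fr : List (Int × Int)) : Int := fr.foldl (fun n r => n + (r.2 - r.1 + 1)) 0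

def pvLastEnd (fr : List (Int × Int)) : Option Int := fr.getLast?.map Prod.snd

lemma pvSumLen_concat (fr : List (Int × Int)) (p : Int × Int) :
    pvSumLen (fr ++ [p]) = pvSumLen fr + (p.2 - p.1 + 1) := by
  simp [pvSumLen, PySem.List.foldl_add (g := fun r : Int × Int => r.2 - r.1 + 1)]

-- one step of B's sweep tracks (sum of lengths, last end) of A's merged list
lemma pvStep_agree (fr : List (Int × Int)) (p : Int × Int) (hp : p.1 ≤ p.2) :
    pvSweepStep (pvSumLen fr, pvLastEnd fr) p
      = (pvSumLen (pvMergeStep fr p), pvLastEnd (pvMergeStep fr p)) := by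
  rcases List.eq_nil_or_concat fr with rfl | ⟨fr0, last, rfl⟩
  · simp [pvSweepStep, pvMergeStep, pvSumLen, pvLastEnd, hp]
  · obtain ⟨l0, l1⟩ := last
    obtain ⟨s, e⟩ := p
    simp only at hp
    simp only [List.concat_eq_append, pvSweepStep, pvMergeStep, pvLastEnd,
      List.getLast?_concat, List.dropLast_concat, Option.map_some]
    by_cases h1 : s ≤ l1 ∧ e > l1
    · simp only [if_pos h1, pvSumLen_concat, List.getLast?_concat, Option.map_some,
        Prod.mk.injEq, Option.some.injEq]
      exact ⟨by simp only [max_def]; split_ifs <;> omega, by split_ifs <;> omega⟩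
    · by_cases h2 : s > l1
      · simp only [if_neg h1, if_pos h2, pvSumLen_concat, List.getLast?_concat, Option.map_some,
          Prod.mk.injEq, Option.some.injEq]
        exact ⟨by simp only [max_def]; split_ifs <;> omega, by split_ifs <;> omega⟩
      · simp only [if_neg h1, if_neg h2, pvSumLen_concat, List.getLast?_concat, Option.map_some,
          Prod.mk.injEq, Option.some.injEq]
        exact ⟨by simp only [max_def]; split_ifs <;> omega, by split_ifs <;> omega⟩

-- B's whole sweep equals (sum of lengths, last end) of A's whole merge
lemma pvSweep_eq (l : List (Int × Int)) (hl : ∀ p ∈ l, p.1 ≤ p.2) : ∀ fr : List (Int × Int),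
    l.foldl pvSweepStep (pvSumLen fr, pvLastEnd fr)
      = (pvSumLen (l.foldl pvMergeStep fr), pvLastEnd (l.foldl pvMergeStep fr)) := by
  induction l with
  | nil => intro fr; rfl
  | cons p rest ih =>
      intro fr
      have hp : p.1 ≤ p.2 := hl p (by simp)
      simp only [List.foldl_cons, pvStep_agree fr p hp]
      exact ih (fun q hq => hl q (by simp [hq])) (pvMergeStep fr p)

-- coverage predicate (the membership test both programs run per beacon)
def pvCov (fr : List (Int × Int)) (x : Int) : Bool := fr.any (fun q => decide (q.1 ≤ x ∧ x ≤ q.2))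

lemma pvCov_iff (fr : List (Int × Int)) (x : Int) :
    pvCov fr x = true ↔ ∃ q ∈ fr, q.1 ≤ x ∧ x ≤ q.2 := by
  simp [pvCov]

-- insertion with Python's lexicographic "before" keeps the list sorted by first component
lemma pvInsertBy_fst_pairwise (x : Int × Int) (ys : List (Int × Int))
    (h : ys.Pairwise (fun a b : Int × Int => a.1 ≤ b.1)) :
    (PySem.List.insertBy
      (fun a b : Int × Int => decide (a.1 < b.1) || (!decide (b.1 < a.1) && decide (a.2 < b.2)))
      x ys).Pairwise (fun a b : Int × Int => a.1 ≤ b.1) := by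
  induction ys with
  | nil => simp [PySem.List.insertBy]
  | cons y ys ih =>
      rw [PySem.List.insertBy.eq_2]
      split_ifs with hb
      · have hxy : x.1 ≤ y.1 := by
          simp only [Bool.or_eq_true, Bool.and_eq_true, Bool.not_eq_true', decide_eq_true_eq,
            decide_eq_false_iff_not] at hb
          omega
        refine List.pairwise_cons.mpr ⟨?_, h⟩
        intro z hz
        rcases List.mem_cons.mp hz with rfl | hz
        · exact hxy
        · exact le_trans hxy ((List.pairwise_cons.mp h).1 z hz)
      · have hyx : y.1 ≤ x.1 := by
          simp only [Bool.or_eq_true, Bool.and_eq_true, Bool.not_eq_true', decide_eq_true_eq,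
            decide_eq_false_iff_not, not_or, not_and] at hb
          omega
        refine List.pairwise_cons.mpr ⟨?_, ih (List.pairwise_cons.mp h).2⟩
        intro z hz
        rcases (PySem.List.mem_insertBy _ x z ys).mp hz with rfl | hz
        · exact hyx
        · exact (List.pairwise_cons.mp h).1 z hz

-- sorted2 with keys (fst, snd) is sorted by first component
lemma pvSorted2_fst_pairwise (xs : List (Int × Int)) :
    (PySem.List.sorted2 xs Prod.fst Prod.snd).Pairwise (fun a b : Int × Int => a.1 ≤ b.1) := by
  have hgen : ∀ (l acc : List (Int × Int)),
      acc.Pairwise (fun a b : Int × Int => a.1 ≤ b.1) →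
      (l.foldl (fun acc x => PySem.List.insertBy
        (fun a b : Int × Int => decide (a.1 < b.1) || (!decide (b.1 < a.1) && decide (a.2 < b.2)))
        x acc) acc).Pairwise (fun a b : Int × Int => a.1 ≤ b.1) := by
    intro l
    induction l with
    | nil => intro acc h; exact h
    | cons x l ih =>
        intro acc h
        exact ih _ (pvInsertBy_fst_pairwise x acc h)
  simpa [PySem.List.sorted2] using hgen xs [] List.Pairwise.nil

-- the new last start of a merge step is the old one or p's start
lemma pvMergeStep_last (fr : List (Int × Int)) (p last' : Int × Int)
    (h : (pvMergeStep fr p).getLast? = some last') :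
    last'.1 = p.1 ∨ ∃ last, fr.getLast? = some last ∧ last'.1 = last.1 := by
  rcases List.eq_nil_or_concat fr with rfl | ⟨fr0, last, rfl⟩
  · simp [pvMergeStep] at h
    simp [← h]
  · simp only [List.concat_eq_append, pvMergeStep, List.getLast?_concat,
      List.dropLast_concat] at h
    simp only [List.concat_eq_append]
    split_ifs at h <;> simp only [List.getLast?_concat, Option.some.injEq] at h <;> subst h
    · exact Or.inr ⟨last, List.getLast?_concat, rfl⟩
    · exact Or.inl rfl
    · exact Or.inr ⟨last, List.getLast?_concat, rfl⟩

-- one merge step preserves the covered set (given sortedness of starts)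
lemma pvCov_step (fr : List (Int × Int)) (p : Int × Int) (x : Int)
    (hinv : ∀ last, fr.getLast? = some last → last.1 ≤ p.1) :
    pvCov (pvMergeStep fr p) x = (pvCov fr x || decide (p.1 ≤ x ∧ x ≤ p.2)) := by
  apply Bool.coe_iff_coe.mp
  rcases List.eq_nil_or_concat fr with rfl | ⟨fr0, last, rfl⟩
  · simp [pvMergeStep, pvCov]
  · have hlast := hinv last (by simp)
    obtain ⟨l0, l1⟩ := last
    obtain ⟨s, e⟩ := p
    simp only [List.concat_eq_append, pvMergeStep, List.getLast?_concat, List.dropLast_concat]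
    split_ifs with h1 h2 <;>
      simp only [pvCov_iff, Bool.or_eq_true, decide_eq_true_eq, List.mem_append,
        List.mem_singleton] <;> constructor
    · rintro ⟨q, hq | rfl, hqx⟩
      · exact Or.inl ⟨q, Or.inl hq, hqx⟩
      · simp only at hqx
        by_cases hx : x ≤ l1
        · exact Or.inl ⟨(l0, l1), Or.inr rfl, by simp; omega⟩
        · exact Or.inr (by simp at hlast ⊢; omega)
    · rintro (⟨q, hq | rfl, hqx⟩ | hx)
      · exact ⟨q, Or.inl hq, hqx⟩
      · exact ⟨(l0, e), Or.inr rfl, by simp_all; omega⟩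
      · exact ⟨(l0, e), Or.inr rfl, by simp_all; omega⟩
    · rintro ⟨q, (hq | hq) | rfl, hqx⟩
      · exact Or.inl ⟨q, Or.inl hq, hqx⟩
      · exact Or.inl ⟨q, Or.inr hq, hqx⟩
      · exact Or.inr hqx
    · rintro (⟨q, hq | rfl, hqx⟩ | hx)
      · exact ⟨q, Or.inl (Or.inl hq), hqx⟩
      · exact ⟨(l0, l1), Or.inl (Or.inr rfl), hqx⟩
      · exact ⟨(s, e), Or.inr rfl, hx⟩
    · rintro ⟨q, hq, hqx⟩
      exact Or.inl ⟨q, hq, hqx⟩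
    · rintro (⟨q, hq, hqx⟩ | hx)
      · exact ⟨q, hq, hqx⟩
      · refine ⟨(l0, l1), Or.inr rfl, ?_⟩
        simp only at hx hlast ⊢
        omega

-- the whole merge preserves the covered set over any sorted-by-start input list
lemma pvCov_merge (l : List (Int × Int)) (x : Int) :
    l.Pairwise (fun a b => a.1 ≤ b.1) → ∀ fr : List (Int × Int),
    (∀ last, fr.getLast? = some last → ∀ q ∈ l, last.1 ≤ q.1) →
    pvCov (l.foldl pvMergeStep fr) x = (pvCov fr x || pvCov l x) := by
  induction l with
  | nil => intro _ fr _; simp [pvCov]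
  | cons p rest ih =>
      intro hpw fr hinv
      simp only [List.foldl_cons]
      rw [ih hpw.tail (pvMergeStep fr p) ?inv]
      case inv =>
        intro last' hlast' q hq
        rcases pvMergeStep_last fr p last' hlast' with h | ⟨last, hl, h⟩
        · rw [h]; exact (List.pairwise_cons.mp hpw).1 q hq
        · rw [h]; exact hinv last hl q (by simp [hq])
      rw [pvCov_step fr p x (fun last hl => hinv last hl p (by simp))]
      simp [pvCov, Bool.or_assoc]

-- ===== VERDICT (by name: the statement is the Claim_ definition above) =====
theorem findBeaconFreeRanges_spec : Claim_equal_findBeaconFreeRanges := by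
  intro sc bc ds row _ _
  unfold Spec_findBeaconFreeRanges findBeaconFreeRanges findBeaconFreeRanges_alt
  rw [pvBuild_eq]
  simp only
  set intervals := pvBuildB sc ds row with hI
  set L := PySem.List.sorted2 intervals Prod.fst Prod.snd with hL
  have hperm : L.Perm intervals := PySem.List.sorted2_perm intervals Prod.fst Prod.snd false
  have hlohi : ∀ p ∈ L, p.1 ≤ p.2 := fun p hp =>
    pvBuildB_lohi sc ds row p (hperm.mem_iff.mp hp)
  -- the sweep's first component is the merged list's total length
  have hsum := pvSweep_eq L hlohi []
  have hsum1 : (L.foldl pvSweepStep ((0 : Int), (none : Option Int))).1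
      = pvSumLen (L.foldl pvMergeStep []) := by
    have h0 : ((0 : Int), (none : Option Int)) = (pvSumLen [], pvLastEnd []) := rfl
    rw [h0, hsum]
  -- the merged list covers the same x's as the raw intervals
  have hpw : L.Pairwise (fun a b : Int × Int => a.1 ≤ b.1) := pvSorted2_fst_pairwise intervals
  have hcov : ∀ y : Int,
      (L.foldl pvMergeStep []).any (fun q => decide (q.1 ≤ y ∧ y ≤ q.2))
        = intervals.any (fun q => decide (q.1 ≤ y ∧ y ≤ q.2)) := by
    intro y
    have h1 := pvCov_merge L y hpw [] (by intro last h; simp at h)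
    simp only [pvCov] at h1
    rw [h1]
    simp [List.Perm.any_eq hperm]
  -- same initial accumulator, same per-beacon step
  rw [hsum1]
  refine PySem.List.foldl_congr_mem _ _ _ _ ?_
  intro acc b _
  simp only [hcov b.1]
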